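-- pv_equiv track=rewrite | github.com/sokolegg/ocr_project | ocr_pipe/image_to_text/image_to_txt.py | filter_str
-- ===== SOURCE A (Python) =====
-- import string
--
-- def filter_str(str_obj):
-- 	delete_if_repeat = list('\t\n\r' + ' ' + string.punctuation)
-- 	previous_symbol = None
-- 	new_str_obj = []
-- 	for symbol in str_obj:
-- 		if symbol in delete_if_repeat and previous_symbol in delete_if_repeat:
-- 			continue
-- 		else:
-- 			new_str_obj.append(f"{symbol}")
-- 		previous_symbol = symbol
-- 	return ''.join(new_str_obj)
-- ===== SOURCE B (Python) =====
-- import string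
-- from itertools import groupby
--
-- def filter_str(str_obj):
--     delete_set = set('\t\n\r' + ' ' + string.punctuation)
--     pieces = []
--     for is_del, group in groupby(str_obj, key=lambda c: c in delete_set):
--         if is_del:
--             pieces.append(next(group))
--         else:
--             pieces.extend(group)
--     return ''.join(pieces)
-- ===== Notes on version B (the rewrite author's own statement) =====
-- stated objective: idiomatic
-- what changed: Replaced A's char-by-char loop carrying a previous-symbol variable by an itertools.groupby pass over runs keyed on membership in the delete set, keeping the first char of each delete-run and every char of other runs.
import Mathlib
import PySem

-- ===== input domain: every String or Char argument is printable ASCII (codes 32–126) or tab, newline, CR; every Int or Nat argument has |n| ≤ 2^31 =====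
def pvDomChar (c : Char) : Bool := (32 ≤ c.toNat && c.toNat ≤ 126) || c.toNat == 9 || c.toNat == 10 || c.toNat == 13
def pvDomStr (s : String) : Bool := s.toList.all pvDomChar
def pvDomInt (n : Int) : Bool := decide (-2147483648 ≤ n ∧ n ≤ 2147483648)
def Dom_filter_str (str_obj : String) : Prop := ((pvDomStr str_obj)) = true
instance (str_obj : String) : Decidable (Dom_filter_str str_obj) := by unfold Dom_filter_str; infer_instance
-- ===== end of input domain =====

-- B replaces A's char-by-char loop with previous-symbol state by a run-based pass
-- (groupby on the delete-set key: keep the first char of delete-runs, all of keep-runs);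
-- objective: idiomatic (a timing run also measured B faster by a constant factor).

-- ===== PORT A =====
-- '\t\n\r' + ' ' + string.punctuation, as the list A builds
def pvDelA : List Char := ("\t\n\r !\"#$%&'()*+,-./:;<=>?@[\\]^_`{|}~").toList

-- the body of A's for-loop: state = (previous_symbol, new_str_obj)
def pvStepA (st : Option Char × List Char) (symbol : Char) : Option Char × List Char :=
  if pvDelA.contains symbol &&
     (match st.1 with | some p => pvDelA.contains p | none => false) then
    st
  else
    (some symbol, st.2 ++ [symbol])

def filter_str (str_obj : String) : String :=
  String.mk (str_obj.toList.foldl pvStepA ((none : Option Char), ([] : List Char))).2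

-- ===== PORT B =====
-- B's delete_set (a Python set built from the same characters)
def pvDelB : List Char := PySem.Set.ofList ("\t\n\r !\"#$%&'()*+,-./:;<=>?@[\\]^_`{|}~").toList

def pvIsDel (c : Char) : Bool := pvDelB.contains c

-- itertools.groupby by the key (c in delete_set): maximal runs of equal key
def pvRuns : List Char → List (List Char)
  | [] => []
  | c :: cs =>
    match pvRuns cs with
    | [] => [[c]]
    | [] :: gs => [c] :: gs           -- unreachable: runs are never empty
    | (d :: t) :: gs =>
      if pvIsDel c = pvIsDel d then (c :: d :: t) :: gs else [c] :: (d :: t) :: gs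

-- per-run choice: first char of a delete-run, the whole of a keep-run
def pvPick (g : List Char) : List Char :=
  match g with
  | [] => []
  | d :: ds => if pvIsDel d then [d] else d :: ds

def filter_str_alt (str_obj : String) : String :=
  String.mk ((pvRuns str_obj.toList).flatMap pvPick)

-- ===== PRECONDITION & SPEC =====
def Spec_filter_str (str_obj : String) (out : String) : Prop := out = filter_str_alt str_obj
instance (str_obj : String) (out : String) : Decidable (Spec_filter_str str_obj out) := by unfold Spec_filter_str; infer_instance

-- ===== CLAIM (what is proved, stated in full; the proofs are below) =====
def Claim_equal_filter_str : Prop := ∀ (str_obj : String), Dom_filter_str str_obj → Spec_filter_str str_obj (filter_str str_obj)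

-- ===== LEMMAS AND PROOFS =====

-- common recursive characterisation: pvF prevD l, prevD = "previous kept char is a delete-char"
def pvF : Bool → List Char → List Char
  | _, [] => []
  | prevD, c :: cs =>
    if pvIsDel c then (if prevD then pvF true cs else c :: pvF true cs)
    else c :: pvF false cs

lemma pvF_del_true {c : Char} (cs : List Char) (h : pvIsDel c = true) :
    pvF true (c :: cs) = pvF true cs := by simp [pvF, h]

lemma pvF_del_false {c : Char} (cs : List Char) (h : pvIsDel c = true) :
    pvF false (c :: cs) = c :: pvF true cs := by simp [pvF, h]

lemma pvF_keep {c : Char} (b : Bool) (cs : List Char) (h : pvIsDel c = false) :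
    pvF b (c :: cs) = c :: pvF false cs := by cases b <;> simp [pvF, h]

lemma pvDelB_eq : pvDelB = pvDelA := by decide

def pvPrevD : Option Char → Bool
  | none => false
  | some p => pvIsDel p

lemma A_loop (l : List Char) : ∀ (prev : Option Char) (acc : List Char),
    (l.foldl pvStepA (prev, acc)).2 = acc ++ pvF (pvPrevD prev) l := by
  induction l with
  | nil => intro prev acc; simp [pvF]
  | cons c cs ih =>
    intro prev acc
    have hstep : pvStepA (prev, acc) c =
        if pvIsDel c && pvPrevD prev then (prev, acc) else (some c, acc ++ [c]) := by
      cases prev <;> simp [pvStepA, pvPrevD, pvIsDel, pvDelB_eq]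
    rw [List.foldl_cons, hstep]
    cases hc : pvIsDel c with
    | false =>
      rw [if_neg (by simp), ih (some c) (acc ++ [c]), pvF_keep _ _ hc]
      simp [pvPrevD, hc]
    | true =>
      cases hp : pvPrevD prev with
      | false =>
        rw [if_neg (by simp), ih (some c) (acc ++ [c])]
        cases prev with
        | none => simp [pvPrevD, hc, pvF_del_false _ hc]
        | some p =>
          rw [pvF_del_false _ hc]
          simp [pvPrevD, hc]
      | true =>
        rw [if_pos (by simp [hc, hp]), ih prev acc, hp, pvF_del_true _ hc]

lemma A_eq_pvF (s : String) : filter_str s = String.mk (pvF false s.toList) := by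
  unfold filter_str
  rw [A_loop]
  simp [pvPrevD]

lemma runs_cons (c : Char) (cs : List Char) :
    ∃ t gs, pvRuns (c :: cs) = (c :: t) :: gs := by
  cases h : pvRuns cs with
  | nil => exact ⟨[], [], by simp [pvRuns, h]⟩
  | cons g gs =>
    cases g with
    | nil => exact ⟨[], gs, by simp [pvRuns, h]⟩
    | cons d t =>
      by_cases hd : pvIsDel c = pvIsDel d
      · exact ⟨d :: t, gs, by simp [pvRuns, h, hd]⟩
      · exact ⟨[], (d :: t) :: gs, by simp [pvRuns, h, hd]⟩

lemma pvRuns_cons_eq (c : Char) (cs : List Char) :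
    pvRuns (c :: cs) =
      (match pvRuns cs with
       | [] => [[c]]
       | [] :: gs => [c] :: gs
       | (d :: t) :: gs =>
         if pvIsDel c = pvIsDel d then (c :: d :: t) :: gs else [c] :: (d :: t) :: gs) := rfl

lemma B_main : ∀ l : List Char, (pvRuns l).flatMap pvPick = pvF false l := by
  intro l
  induction l with
  | nil => simp [pvRuns, pvF]
  | cons c cs ih =>
    cases cs with
    | nil =>
      cases h : pvIsDel c <;> simp [pvRuns, pvPick, pvF, h]
    | cons d ds =>
      obtain ⟨t, gs, hr⟩ := runs_cons d ds
      rw [hr] at ih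
      by_cases hcd : pvIsDel c = pvIsDel d
      · have hruns : pvRuns (c :: d :: ds) = (c :: d :: t) :: gs := by
          rw [pvRuns_cons_eq, hr]; simp [hcd]
        rw [hruns]
        cases hd : pvIsDel d with
        | true =>
          have hc : pvIsDel c = true := by rw [hcd, hd]
          rw [pvF_del_false _ hd] at ih
          simp only [pvPick, hd, List.flatMap_cons] at ih
          have hgs : gs.flatMap pvPick = pvF true ds := by simpa using ih
          rw [pvF_del_false _ hc, pvF_del_true _ hd]
          simp [pvPick, hc, hgs]
        | false =>
          have hc : pvIsDel c = false := by rw [hcd, hd]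
          rw [pvF_keep _ _ hd] at ih
          simp only [pvPick, hd, List.flatMap_cons] at ih
          rw [pvF_keep _ _ hc, pvF_keep _ _ hd]
          have ih' : t ++ gs.flatMap pvPick = pvF false ds := by simpa using ih
          simp [pvPick, hc, ← ih']
      · have hruns : pvRuns (c :: d :: ds) = [c] :: (d :: t) :: gs := by
          rw [pvRuns_cons_eq, hr]; simp [hcd]
        rw [hruns]
        cases hc : pvIsDel c with
        | true =>
          have hd : pvIsDel d = false := by
            cases h : pvIsDel d
            · rfl
            · exact absurd (by rw [hc, h]) hcd
          rw [pvF_del_false _ hc, pvF_keep _ _ hd]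
          rw [pvF_keep _ _ hd] at ih
          simp only [List.flatMap_cons, pvPick, hc]
          rw [← ih]
          simp [pvPick]
        | false =>
          rw [pvF_keep _ _ hc]
          simp only [List.flatMap_cons, pvPick, hc]
          rw [← ih]
          simp [pvPick]

-- ===== VERDICT (by name: the statement is the Claim_ definition above) =====
theorem filter_str_spec : Claim_equal_filter_str := by
  intro s _
  unfold Spec_filter_str
  rw [A_eq_pvF]
  unfold filter_str_alt
  rw [B_main]
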